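-- pv_equiv track=rewrite | github.com/Srinivas-Raghav-VC/copy-retrieve-compose | Draft_Results/paper2_fidelity_calibrated/run_causal_head_attention_patterns.py | _find_first_subsequence_after
-- ===== SOURCE A (Python) =====
-- from typing import Any, Dict, List, Optional, Sequence, Tuple
--
-- def _find_first_subsequence_after(haystack: Sequence[int], needle: Sequence[int], start: int) -> Optional[Tuple[int, int]]:
--     if not needle or len(needle) > len(haystack):
--         return None
--     n = len(needle)
--     for idx in range(max(0, int(start)), len(haystack) - n + 1):
--         if list(haystack[idx : idx + n]) == list(needle):
--             return (idx, idx + n)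
--     return None
-- ===== SOURCE B (Python) =====
-- from typing import Optional, Sequence, Tuple
--
--
-- def _find_first_subsequence_after(haystack: Sequence[int], needle: Sequence[int], start: int) -> Optional[Tuple[int, int]]:
--     # Rabin-Karp: rolling polynomial hash over the window; compare slices only on a hash hit.
--     hs = list(haystack)
--     nd = list(needle)
--     n = len(nd)
--     if n == 0 or n > len(hs):
--         return None
--     MOD = (1 << 61) - 1
--     BASE = 131
--     pw = pow(BASE, n - 1, MOD)
--     target = 0
--     for x in nd:
--         target = (target * BASE + x) % MOD
--     lo = max(0, int(start))
--     h = 0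
--     for x in hs[lo:lo + n]:
--         h = (h * BASE + x) % MOD
--     for i in range(lo, len(hs) - n + 1):
--         if h == target and hs[i:i + n] == nd:
--             return (i, i + n)
--         if i + n < len(hs):
--             h = ((h - hs[i] * pw) * BASE + hs[i + n]) % MOD
--     return None
-- ===== Notes on version B (the rewrite author's own statement) =====
-- stated objective: alternative
-- what changed: Replaced the per-index slice-and-compare scan with Rabin-Karp rolling-hash search: a full window comparison happens only when the rolling hash of the current window equals the needle's hash.
import Mathlib
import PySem

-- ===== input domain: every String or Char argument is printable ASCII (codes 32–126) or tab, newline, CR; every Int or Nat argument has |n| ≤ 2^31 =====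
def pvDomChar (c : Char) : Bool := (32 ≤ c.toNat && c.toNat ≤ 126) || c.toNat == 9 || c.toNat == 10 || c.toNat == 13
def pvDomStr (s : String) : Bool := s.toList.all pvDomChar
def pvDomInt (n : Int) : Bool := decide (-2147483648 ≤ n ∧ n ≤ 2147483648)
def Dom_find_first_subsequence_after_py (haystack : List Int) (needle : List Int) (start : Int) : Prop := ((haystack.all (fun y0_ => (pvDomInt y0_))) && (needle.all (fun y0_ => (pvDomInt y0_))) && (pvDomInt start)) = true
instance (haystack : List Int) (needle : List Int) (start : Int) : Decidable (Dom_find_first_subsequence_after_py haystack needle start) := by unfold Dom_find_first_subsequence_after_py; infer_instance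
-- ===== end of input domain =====

-- B replaces A's per-index slice comparison with Rabin-Karp rolling-hash search (objective: alternative algorithm).

-- ===== PORT A =====
-- the 'for idx in range(...)' loop of A, returning at the first matching slice
def pvLoopA (hay nd : List Int) : List Int → Option (Int × Int)
  | [] => none
  | i :: rest =>
    if PySem.List.slice hay (some i) (some (i + (nd.length : Int))) = nd then
      some (i, i + (nd.length : Int))
    else pvLoopA hay nd rest

def find_first_subsequence_after_py (haystack : List Int) (needle : List Int) (start : Int) : Option (Int × Int) :=
  if needle = [] ∨ (needle.length : Int) > (haystack.length : Int) then none
  else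
    pvLoopA haystack needle
      (PySem.List.pyRange (max 0 start) ((haystack.length : Int) - (needle.length : Int) + 1) 1)

-- ===== PORT B =====
def pvMOD : Int := 2305843009213693951   -- (1 << 61) - 1
def pvBASE : Int := 131

-- 'h = (h * BASE + x) % MOD' accumulation
def pvHash (l : List Int) : Int := l.foldl (fun a x => PySem.Int.mod (a * pvBASE + x) pvMOD) 0

-- B's main loop: state is the rolling hash h; hay[i] / hay[i+n] are in range whenever the
-- rolling branch fires (guard i + n < len, i ≥ 0), so the .getD 0 default is never used
def pvLoopB (hay nd : List Int) (target pw : Int) : List Int → Int → Option (Int × Int)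
  | [], _ => none
  | i :: rest, h =>
    if h = target ∧ PySem.List.slice hay (some i) (some (i + (nd.length : Int))) = nd then
      some (i, i + (nd.length : Int))
    else
      pvLoopB hay nd target pw rest
        (if i + (nd.length : Int) < (hay.length : Int) then
          PySem.Int.mod ((h - (PySem.List.pyGet? hay i).getD 0 * pw) * pvBASE
              + (PySem.List.pyGet? hay (i + (nd.length : Int))).getD 0) pvMOD
        else h)

def find_first_subsequence_after_py_alt (haystack : List Int) (needle : List Int) (start : Int) : Option (Int × Int) :=
  let n : Int := (needle.length : Int)
  if needle.length = 0 ∨ n > (haystack.length : Int) then none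
  else
    let pw := PySem.Int.powMod pvBASE (needle.length - 1) pvMOD
    let target := pvHash needle
    let lo := max 0 start
    let h0 := pvHash (PySem.List.slice haystack (some lo) (some (lo + n)))
    pvLoopB haystack needle target pw
      (PySem.List.pyRange lo ((haystack.length : Int) - n + 1) 1) h0

-- ===== PRECONDITION & SPEC =====
def Spec_find_first_subsequence_after_py (haystack : List Int) (needle : List Int) (start : Int) (out : Option (Int × Int)) : Prop := out = find_first_subsequence_after_py_alt haystack needle start
instance (haystack : List Int) (needle : List Int) (start : Int) (out : Option (Int × Int)) : Decidable (Spec_find_first_subsequence_after_py haystack needle start out) := by unfold Spec_find_first_subsequence_after_py; infer_instance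

-- ===== CLAIM (what is proved, stated in full; the proofs are below) =====
def Claim_equal_find_first_subsequence_after_py : Prop := ∀ (haystack : List Int) (needle : List Int) (start : Int), Dom_find_first_subsequence_after_py haystack needle start → Spec_find_first_subsequence_after_py haystack needle start (find_first_subsequence_after_py haystack needle start)

-- ===== LEMMAS AND PROOFS =====

theorem pvMOD_pos : (0 : Int) < pvMOD := by decide

-- the un-modded polynomial value of a list
def pvPoly (l : List Int) : Int := l.foldl (fun a x => a * pvBASE + x) 0

theorem pvHash_foldl (l : List Int) : ∀ a : Int,
    l.foldl (fun a x => PySem.Int.mod (a * pvBASE + x) pvMOD) (PySem.Int.mod a pvMOD)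
      = PySem.Int.mod (l.foldl (fun a x => a * pvBASE + x) a) pvMOD := by
  induction l with
  | nil => intro a; rfl
  | cons x l ih =>
    intro a
    simp only [List.foldl_cons]
    have h1 : PySem.Int.mod (PySem.Int.mod a pvMOD * pvBASE + x) pvMOD
        = PySem.Int.mod (a * pvBASE + x) pvMOD := by
      simp only [PySem.Int.mod_eq_emod_of_pos pvMOD_pos]
      have hmm : a % pvMOD ≡ a [ZMOD pvMOD] := Int.emod_emod_of_dvd a dvd_rfl
      exact (hmm.mul_right pvBASE).add_right x
    rw [h1, ← ih (a * pvBASE + x)]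

theorem pvHash_eq_poly (l : List Int) : pvHash l = PySem.Int.mod (pvPoly l) pvMOD := by
  have h0 : (0 : Int) = PySem.Int.mod 0 pvMOD := by decide
  unfold pvHash pvPoly
  rw [h0, pvHash_foldl]
  rw [← h0]

theorem pvPoly_shift (l : List Int) : ∀ a : Int,
    l.foldl (fun a x => a * pvBASE + x) a = a * pvBASE ^ l.length + pvPoly l := by
  induction l with
  | nil => intro a; simp [pvPoly]
  | cons x l ih =>
    intro a
    simp only [List.foldl_cons, List.length_cons]
    rw [ih (a * pvBASE + x)]
    have : pvPoly (x :: l) = (0 * pvBASE + x) * pvBASE ^ l.length + pvPoly l := by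
      rw [pvPoly, List.foldl_cons, ih (0 * pvBASE + x)]
    rw [this]
    ring

theorem pvPoly_append_singleton (l : List Int) (y : Int) :
    pvPoly (l ++ [y]) = pvPoly l * pvBASE + y := by
  simp [pvPoly, List.foldl_append]

-- rolling-hash step: hash of the next window from the hash of the current one
theorem pvRoll (hay : List Int) (n : Nat) (hn : 1 ≤ n) (j : Nat) (hj : j + n < hay.length) :
    PySem.Int.mod ((pvHash ((hay.drop j).take n) - (hay.getD j 0) * PySem.Int.powMod pvBASE (n-1) pvMOD) * pvBASE
        + hay.getD (j+n) 0) pvMOD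
      = pvHash ((hay.drop (j+1)).take n) := by
  have hjlt : j < hay.length := by omega
  have hx : hay.getD j 0 = hay[j] := List.getD_eq_getElem hay 0 hjlt
  have hy : hay.getD (j+n) 0 = hay[j+n] := List.getD_eq_getElem hay 0 hj
  have hdrop : hay.drop j = hay[j] :: hay.drop (j+1) := List.drop_eq_getElem_cons hjlt
  have hlen2 : n ≤ (hay.drop (j+1)).length := by simp [List.length_drop]; omega
  have hw : (hay.drop j).take n = hay[j] :: (hay.drop (j+1)).take (n-1) := by
    rw [hdrop]
    have h1 : n = (n-1) + 1 := by omega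
    conv_lhs => rw [h1]
    rw [List.take_succ_cons]
  have hgoal_idx : (hay.drop (j+1))[n-1]? = some hay[j+n] := by
    rw [List.getElem?_drop]
    rw [List.getElem?_eq_getElem (by omega)]
    congr 1
    congr 1
    omega
  have hw' : (hay.drop (j+1)).take n = (hay.drop (j+1)).take (n-1) ++ [hay[j+n]] := by
    have h1 : n = (n-1) + 1 := by omega
    conv_lhs => rw [h1, List.take_add_one]
    rw [hgoal_idx]
    rfl
  have hmlen : ((hay.drop (j+1)).take (n-1)).length = n - 1 := by
    simp [List.length_take, List.length_drop]; omega
  set m := (hay.drop (j+1)).take (n-1) with hm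
  have hpolyw : pvPoly ((hay.drop j).take n) = hay[j] * pvBASE ^ (n-1) + pvPoly m := by
    rw [hw, pvPoly, List.foldl_cons, pvPoly_shift, hmlen]
    ring_nf
  rw [hx, hy, hw', pvHash_eq_poly, pvHash_eq_poly, pvPoly_append_singleton, hpolyw,
    PySem.Int.powMod_eq]
  simp only [PySem.Int.mod_eq_emod_of_pos pvMOD_pos]
  have h1 : (hay[j] * pvBASE ^ (n-1) + pvPoly m) % pvMOD ≡ hay[j] * pvBASE ^ (n-1) + pvPoly m [ZMOD pvMOD] :=
    Int.emod_emod_of_dvd _ dvd_rfl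
  have h2 : pvBASE ^ (n-1) % pvMOD ≡ pvBASE ^ (n-1) [ZMOD pvMOD] :=
    Int.emod_emod_of_dvd _ dvd_rfl
  have h3 := ((h1.sub (h2.mul_left hay[j])).mul_right pvBASE).add_right hay[j+n]
  calc ((hay[j] * pvBASE ^ (n-1) + pvPoly m) % pvMOD - hay[j] * (pvBASE ^ (n-1) % pvMOD)) * pvBASE + hay[j+n]
      ≡ ((hay[j] * pvBASE ^ (n-1) + pvPoly m) - hay[j] * pvBASE ^ (n-1)) * pvBASE + hay[j+n] [ZMOD pvMOD] := h3
    _ = pvPoly m * pvBASE + hay[j+n] := by ring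

-- main loop invariant: with h = hash of the current window, B's loop equals A's loop
theorem pvLoop_eq (hay nd : List Int) (hn : nd ≠ []) :
    ∀ (k : Nat) (i : Int), 0 ≤ i → (hay.length : Int) - nd.length + 1 - i ≤ k →
    pvLoopB hay nd (pvHash nd) (PySem.Int.powMod pvBASE (nd.length - 1) pvMOD)
      (PySem.List.pyRange i ((hay.length : Int) - nd.length + 1) 1)
      (pvHash (PySem.List.slice hay (some i) (some (i + (nd.length : Int)))))
    = pvLoopA hay nd (PySem.List.pyRange i ((hay.length : Int) - nd.length + 1) 1) := by
  intro k
  induction k with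
  | zero =>
    intro i h0 hk
    rw [PySem.List.pyRange_one_eq_nil (by omega)]
    rfl
  | succ k ih =>
    intro i h0 hk
    by_cases hib : (hay.length : Int) - nd.length + 1 ≤ i
    · rw [PySem.List.pyRange_one_eq_nil hib]; rfl
    · rw [PySem.List.pyRange_one_cons (by omega)]
      simp only [pvLoopA, pvLoopB]
      by_cases hS : PySem.List.slice hay (some i) (some (i + (nd.length : Int))) = nd
      · rw [if_pos hS, if_pos ⟨by rw [hS], hS⟩]
      · rw [if_neg hS, if_neg (by intro h; exact hS h.2)]
        by_cases hnext : i + (nd.length : Int) < (hay.length : Int)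
        · rw [if_pos hnext]
          have hjj : i = ((i.toNat : Nat) : Int) := (Int.toNat_of_nonneg h0).symm
          set j := i.toNat with hj
          have hjn : j + nd.length < hay.length := by omega
          have e1 : PySem.List.slice hay (some i) (some (i + (nd.length : Int)))
              = (hay.drop j).take nd.length := by
            rw [hjj]; exact PySem.List.slice_natCast_add hay j nd.length
          have e2 : PySem.List.slice hay (some (i+1)) (some ((i+1) + (nd.length : Int)))
              = (hay.drop (j+1)).take nd.length := by
            have : i + 1 = (((j+1 : Nat)) : Int) := by omega
            rw [this]; exact PySem.List.slice_natCast_add hay (j+1) nd.length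
          have eg1 : (PySem.List.pyGet? hay i).getD 0 = hay.getD j 0 := by
            rw [hjj, PySem.List.pyGet?_natCast]; rfl
          have eg2 : (PySem.List.pyGet? hay (i + (nd.length : Int))).getD 0 = hay.getD (j + nd.length) 0 := by
            have : i + (nd.length : Int) = (((j + nd.length : Nat)) : Int) := by omega
            rw [this, PySem.List.pyGet?_natCast]; rfl
          rw [e1, eg1, eg2,
            pvRoll hay nd.length (by simpa [Nat.one_le_iff_ne_zero, List.length_eq_zero_iff] using hn) j hjn,
            ← e2]
          exact ih (i+1) (by omega) (by omega)
        · rw [if_neg hnext]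
          rw [PySem.List.pyRange_one_eq_nil (by omega)]
          rfl

-- ===== VERDICT (by name: the statement is the Claim_ definition above) =====
theorem find_first_subsequence_after_py_spec : Claim_equal_find_first_subsequence_after_py := by
  unfold Claim_equal_find_first_subsequence_after_py Spec_find_first_subsequence_after_py
  intro hay nd start _
  unfold find_first_subsequence_after_py find_first_subsequence_after_py_alt
  by_cases hg : nd = [] ∨ (nd.length : Int) > (hay.length : Int)
  · have hg' : nd.length = 0 ∨ (nd.length : Int) > (hay.length : Int) := by
      rcases hg with h | h
      · exact Or.inl (by simp [h])
      · exact Or.inr h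
    rw [if_pos hg, if_pos hg']
  · push Not at hg
    rw [if_neg (by push Not; exact hg),
        if_neg (by push Not; exact ⟨by simpa [List.length_eq_zero_iff] using hg.1, hg.2⟩)]
    exact (pvLoop_eq hay nd hg.1 ((hay.length : Int) - nd.length + 1 - max 0 start).toNat
      (max 0 start) (le_max_left 0 start) (Int.self_le_toNat _)).symm
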